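-- pv_equiv track=rewrite | github.com/vignatej/AI-classwork | graph_colouring.py | degreeHeu
-- ===== SOURCE A (Python) =====
-- def degreeHeu(graph):
--     index_nei_len=[]
--     for i,l in enumerate(graph.items()):
--         if l[0][1] is False:
--             index_nei_len.append((i,len(l[1])))
--     max_nei=max(index_nei_len,key=lambda x:x[1])[1]
--     max_index_neighbour_len = [t[0] for t in index_nei_len if t[1] == max_nei]
--     cities=[]
--     for i in max_index_neighbour_len:
--         cities.append(list(graph)[i][0])
--     return cities
-- ===== SOURCE B (Python) =====
-- def degreeHeu(graph):
--     by_degree = {}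
--     for key, neighbours in graph.items():
--         if key[1] is False:
--             by_degree.setdefault(len(neighbours), []).append(key[0])
--     return by_degree[max(by_degree)]
-- ===== Notes on version B (the rewrite author's own statement) =====
-- stated objective: simpler
-- what changed: A builds (index, degree) pairs of uncolored cities, takes the max by degree, filters matching indices, and remaps each index back to a name by rebuilding list(graph) inside a loop; B makes one pass grouping uncolored city names into a degree-keyed dict and returns the bucket of the maximal degree, so the index tracking, the filtering comprehension and the index-to-name remapping loop disappear.
import Mathlib
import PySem

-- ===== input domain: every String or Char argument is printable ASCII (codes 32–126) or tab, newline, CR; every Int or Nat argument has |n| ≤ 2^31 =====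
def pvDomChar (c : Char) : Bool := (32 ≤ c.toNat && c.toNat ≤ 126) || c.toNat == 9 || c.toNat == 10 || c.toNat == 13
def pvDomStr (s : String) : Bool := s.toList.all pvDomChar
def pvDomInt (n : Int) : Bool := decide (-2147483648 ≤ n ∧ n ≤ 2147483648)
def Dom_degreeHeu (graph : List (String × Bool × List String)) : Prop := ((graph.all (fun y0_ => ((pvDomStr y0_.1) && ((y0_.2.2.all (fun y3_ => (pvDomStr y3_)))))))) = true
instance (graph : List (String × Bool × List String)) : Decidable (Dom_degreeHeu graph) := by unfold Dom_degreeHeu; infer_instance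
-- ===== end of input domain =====

-- B replaces A's three passes (index/degree pairs, max, index→name remapping through
-- list(graph)) by one pass grouping uncolored city names by degree in a dict and
-- returning the bucket of the maximal degree; a timing run measured B faster (A rebuilds list(graph) per returned city).

-- ===== PORT A =====
def degreeHeu (graph : List (String × Bool × List String)) : List String :=
  let indexNeiLen : List (Int × Int) :=
    (PySem.List.enumerate graph).foldl
      (fun acc p => if p.2.2.1 = false then acc ++ [(p.1, (Int.ofNat p.2.2.2.length))] else acc) []
  match PySem.List.max? indexNeiLen (fun x => x.2) with
  | none => []   -- max([]) raises ValueError in Python: excluded by Pre_degreeHeu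
  | some mx =>
    let maxNei : Int := mx.2
    let maxIndexNeighbourLen : List Int :=
      (indexNeiLen.filter (fun t => t.2 == maxNei)).map (fun t => t.1)
    maxIndexNeighbourLen.foldl
      (fun cities i =>
        cities ++ [match PySem.List.pyGet? graph i with
                   | some e => e.1
                   | none => ""])   -- IndexError branch, unreachable: indices come from enumerate
      []

-- ===== PORT B =====
def degreeHeu_alt (graph : List (String × Bool × List String)) : List String :=
  let byDegree : PySem.Dict Int (List String) :=
    graph.foldl
      (fun d e => if e.2.1 = false then d.modify (Int.ofNat e.2.2.length) [] (fun l => l ++ [e.1]) else d)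
      PySem.Dict.empty
  match PySem.List.max? byDegree.keys (fun x => x) with
  | none => []   -- max() over the empty dict raises ValueError in Python: excluded by Pre_degreeHeu
  | some m => byDegree.getD m []

-- ===== PRECONDITION & SPEC =====
-- Pre_ excludes graphs with no uncolored city, where both Pythons raise ValueError (max of
-- an empty sequence), and lists whose (name, colored) keys are not pairwise distinct, which
-- do not represent a Python dict at all.
def Pre_degreeHeu (graph : List (String × Bool × List String)) : Prop :=
  (graph.map (fun e => (e.1, e.2.1))).Nodup ∧ ∃ e ∈ graph, e.2.1 = false
instance (graph : List (String × Bool × List String)) : Decidable (Pre_degreeHeu graph) := by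
  unfold Pre_degreeHeu; infer_instance
def pvWitness_degreeHeu : (List (String × Bool × List String)) :=
  [("a", false, ["b"]), ("b", true, ["a"])]

def Spec_degreeHeu (graph : List (String × Bool × List String)) (out : List String) : Prop := out = degreeHeu_alt graph
instance (graph : List (String × Bool × List String)) (out : List String) : Decidable (Spec_degreeHeu graph out) := by unfold Spec_degreeHeu; infer_instance

-- ===== CLAIM (what is proved, stated in full; the proofs are below) =====
def Claim_equal_degreeHeu : Prop := ∀ (graph : List (String × Bool × List String)), Dom_degreeHeu graph → Pre_degreeHeu graph → Spec_degreeHeu graph (degreeHeu graph)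

-- ===== LEMMAS AND PROOFS =====

-- the uncolored entries of the graph
def pvUnc (graph : List (String × Bool × List String)) : List (String × Bool × List String) :=
  graph.filter (fun e => e.2.1 == false)

-- their degrees, in order
def pvDegs (graph : List (String × Bool × List String)) : List Int :=
  (pvUnc graph).map (fun e => Int.ofNat e.2.2.length)

-- the common value both programs compute: uncolored names with degree M, in graph order
def pvAns (graph : List (String × Bool × List String)) (M : Int) : List String :=
  ((pvUnc graph).filter (fun e => Int.ofNat e.2.2.length == M)).map (fun e => e.1)

-- A's first loop produces exactly the (index, degree) pairs of the uncolored entries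
theorem pvA_pairs (graph : List (String × Bool × List String)) :
    (PySem.List.enumerate graph).foldl
      (fun acc p => if p.2.2.1 = false then acc ++ [(p.1, (Int.ofNat p.2.2.2.length))] else acc)
      ([] : List (Int × Int))
    = (((PySem.List.enumerate graph).filter (fun p => p.2.2.1 == false)).map
        (fun p => (p.1, Int.ofNat p.2.2.2.length))) := by
  have h := PySem.List.foldl_append_if
    (fun p : Int × (String × Bool × List String) => p.2.2.1 == false)
    (fun p : Int × (String × Bool × List String) => (p.1, Int.ofNat p.2.2.2.length))
    (PySem.List.enumerate graph) []
  simpa using h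

-- B's loop is a grouping fold over the (degree, name) pairs of the uncolored entries
theorem pvB_fold (graph : List (String × Bool × List String)) (d : PySem.Dict Int (List String)) :
    graph.foldl
      (fun d e => if e.2.1 = false then d.modify (Int.ofNat e.2.2.length) [] (fun l => l ++ [e.1]) else d) d
    = ((pvUnc graph).map (fun e => (Int.ofNat e.2.2.length, e.1))).foldl
        (fun d p => d.modify p.1 [] (fun l => l ++ [p.2])) d := by
  induction graph generalizing d with
  | nil => rfl
  | cons e t ih =>
    by_cases h : e.2.1 = false
    · rw [List.foldl_cons, if_pos h, ih]
      have hu : pvUnc (e :: t) = e :: pvUnc t := by simp [pvUnc, h]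
      rw [hu, List.map_cons, List.foldl_cons]
    · have h' : e.2.1 = true := by simpa using h
      rw [List.foldl_cons, if_neg h, ih]
      have hu : pvUnc (e :: t) = pvUnc t := by simp [pvUnc, h']
      rw [hu]

-- dropping the indices of a filtered enumeration gives the filtered list
theorem pvSndFilter (l : List (String × Bool × List String)) (s : Int) :
    ((PySem.List.enumerate l s).filter (fun p => p.2.2.1 == false)).map (fun p => p.2)
    = l.filter (fun e => e.2.1 == false) := by
  induction l generalizing s with
  | nil => simp [PySem.List.enumerate_nil]
  | cons x t ih =>
    by_cases h : x.2.1 = false <;>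
      simpa [PySem.List.enumerate_cons, List.filter_cons, h] using ih (s + 1)

-- the same with the degree filter on top
theorem pvSndFilter2 (l : List (String × Bool × List String)) (s : Int) (M : Int) :
    (((PySem.List.enumerate l s).filter (fun p => p.2.2.1 == false)).filter
        (fun p => Int.ofNat p.2.2.2.length == M)).map (fun p => p.2)
    = (l.filter (fun e => e.2.1 == false)).filter (fun e => Int.ofNat e.2.2.length == M) := by
  induction l generalizing s with
  | nil => simp [PySem.List.enumerate_nil]
  | cons x t ih =>
    by_cases h : x.2.1 = false <;>
      by_cases h2 : (x.2.2.length : Int) = M <;>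
        simpa [PySem.List.enumerate_cons, List.filter_cons, h, h2] using ih (s + 1)

-- A's degree list is the degree list of the uncolored entries
theorem pvDegsA (graph : List (String × Bool × List String)) :
    (((PySem.List.enumerate graph).filter (fun p => p.2.2.1 == false)).map
        (fun p => (p.1, Int.ofNat p.2.2.2.length))).map (fun t => t.2) = pvDegs graph := by
  rw [pvDegs, pvUnc, ← pvSndFilter graph 0, List.map_map, List.map_map]
  rfl

-- A's output loop computes pvAns
theorem pvA_eq (graph : List (String × Bool × List String)) (M : Int) :
    (((((PySem.List.enumerate graph).filter (fun p => p.2.2.1 == false)).map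
        (fun p => (p.1, Int.ofNat p.2.2.2.length))).filter (fun t => t.2 == M)).map (fun t => t.1)).foldl
      (fun cities i =>
        cities ++ [match PySem.List.pyGet? graph i with
                   | some e => e.1
                   | none => ""]) []
    = pvAns graph M := by
  rw [PySem.List.foldl_append_singleton_eq_map, List.nil_append, List.map_map,
      List.filter_map, List.map_map]
  rw [pvAns, pvUnc, ← pvSndFilter2 graph 0 M, List.map_map]
  simp only [Function.comp_def]
  apply List.map_congr_left
  intro p hp
  have hp' : p ∈ PySem.List.enumerate graph 0 :=
    List.mem_of_mem_filter (List.mem_of_mem_filter hp)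
  rcases (PySem.List.mem_enumerate_iff _ _ _).mp hp' with ⟨k, hk, rfl⟩
  simp [PySem.List.pyGet?_natCast, List.getElem?_eq_getElem hk]

-- ===== VERDICT (by name: the statement is the Claim_ definition above) =====
theorem degreeHeu_spec : Claim_equal_degreeHeu := by
  intro graph _hdom hpre
  obtain ⟨_hnodup, e0, he0, he0f⟩ := hpre
  unfold Spec_degreeHeu degreeHeu degreeHeu_alt
  rw [pvA_pairs, pvB_fold]
  have huncne : pvUnc graph ≠ [] := by
    intro h
    have hmem : e0 ∈ pvUnc graph := by
      rw [pvUnc]; exact List.mem_filter.mpr ⟨he0, by simp [he0f]⟩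
    simp [h] at hmem
  set LA := (((PySem.List.enumerate graph).filter (fun p => p.2.2.1 == false)).map
        (fun p => (p.1, Int.ofNat p.2.2.2.length))) with hLA
  have hLAne : LA ≠ [] := by
    intro h
    have hd := pvDegsA graph
    rw [← hLA, h] at hd
    have hd' : pvDegs graph = [] := hd.symm
    rw [pvDegs] at hd'
    exact huncne (List.map_eq_nil_iff.mp hd')
  obtain ⟨mx, hmx⟩ : ∃ mx, PySem.List.max? LA (fun x => x.2) = some mx := by
    cases hc : PySem.List.max? LA (fun x => x.2) with
    | none => exact absurd ((PySem.List.max?_eq_none_iff _ _).mp hc) hLAne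
    | some v => exact ⟨v, rfl⟩
  set D := ((pvUnc graph).map (fun e => (Int.ofNat e.2.2.length, e.1))).foldl
        (fun d p => d.modify p.1 [] (fun l => l ++ [p.2])) PySem.Dict.empty with hD
  have hkeys : D.keys = PySem.Set.update (PySem.Dict.empty : PySem.Dict Int (List String)).keys
      (((pvUnc graph).map (fun e => (Int.ofNat e.2.2.length, e.1))).map (fun p => p.1)) := by
    rw [hD]
    exact PySem.Dict.keys_foldl_modify_key
      ((pvUnc graph).map (fun e => (Int.ofNat e.2.2.length, e.1)))
      (fun p : Int × String => p.1) []
      (fun (_ : PySem.Dict Int (List String)) (p : Int × String) (l : List String) => l ++ [p.2])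
      PySem.Dict.empty
  have hmemkeys : ∀ x : Int, x ∈ D.keys ↔ x ∈ pvDegs graph := by
    intro x
    rw [hkeys, PySem.Set.mem_update]
    simp [PySem.Dict.keys_empty, pvDegs, List.map_map]
  have hkeysne : D.keys ≠ [] := by
    intro h
    obtain ⟨v, hv⟩ : ∃ v, v ∈ pvDegs graph := by
      cases hu : pvUnc graph with
      | nil => exact absurd hu huncne
      | cons a t => exact ⟨Int.ofNat a.2.2.length, by simp [pvDegs, hu]⟩
    rw [← hmemkeys, h] at hv
    simp at hv
  obtain ⟨m, hm⟩ : ∃ m, PySem.List.max? D.keys (fun x => x) = some m := by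
    cases hc : PySem.List.max? D.keys (fun x => x) with
    | none => exact absurd ((PySem.List.max?_eq_none_iff _ _).mp hc) hkeysne
    | some v => exact ⟨v, rfl⟩
  have hMeq : mx.2 = m := by
    have ha1 : mx ∈ LA := PySem.List.max?_mem hmx
    have ha2 := PySem.List.max?_isMax hmx
    have hb1 : m ∈ D.keys := PySem.List.max?_mem hm
    have hb2 := PySem.List.max?_isMax hm
    have hmxdeg : mx.2 ∈ pvDegs graph := by
      rw [← pvDegsA graph, ← hLA]; exact List.mem_map_of_mem ha1
    have hub : ∀ x ∈ pvDegs graph, x ≤ mx.2 := by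
      intro x hx
      rw [← pvDegsA graph, ← hLA] at hx
      obtain ⟨t, ht, rfl⟩ := List.mem_map.mp hx
      exact ha2 t ht
    have hmdeg : m ∈ pvDegs graph := (hmemkeys m).mp hb1
    have hub' : ∀ x ∈ pvDegs graph, x ≤ m := fun x hx => hb2 x ((hmemkeys x).mpr hx)
    exact le_antisymm (hub' mx.2 hmxdeg) (hub m hmdeg)
  simp only [hmx, hm]
  have hA := pvA_eq graph mx.2
  rw [← hLA] at hA
  rw [hA, hMeq]
  have hB : D.getD m [] = pvAns graph m := by
    rw [hD, PySem.Dict.getD_foldl_modify_append]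
    simp [pvAns, List.filter_map, List.map_map, Function.comp_def, PySem.Dict.getD_empty]
  rw [hB]
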